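-- pv_equiv track=rewrite | github.com/adam-pawluczuk/pysorter | main.py | get_from_and_import_separately
-- ===== SOURCE A (Python) =====
-- def get_from_and_import_separately(imports):
--     from_imports = []
--     import_imports = []
--     for import_ in imports:
--         if import_.split() and import_.split()[0] == 'from':
--             from_imports.append(import_)
--         else:
--             import_imports.append(import_)
--     import_imports.extend(from_imports)
--     return import_imports
-- ===== SOURCE B (Python) =====
-- def get_from_and_import_separately(imports):
--     return sorted(imports, key=lambda x: x.split()[:1] == ['from'])
-- ===== Notes on version B (the rewrite author's own statement) =====
-- stated objective: idiomatic
-- what changed: Replaces the two explicit accumulator lists and final extend with a single stable sort keyed on the boolean 'first split token is from', relying on sort stability to keep each group's original order.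
import Mathlib
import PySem

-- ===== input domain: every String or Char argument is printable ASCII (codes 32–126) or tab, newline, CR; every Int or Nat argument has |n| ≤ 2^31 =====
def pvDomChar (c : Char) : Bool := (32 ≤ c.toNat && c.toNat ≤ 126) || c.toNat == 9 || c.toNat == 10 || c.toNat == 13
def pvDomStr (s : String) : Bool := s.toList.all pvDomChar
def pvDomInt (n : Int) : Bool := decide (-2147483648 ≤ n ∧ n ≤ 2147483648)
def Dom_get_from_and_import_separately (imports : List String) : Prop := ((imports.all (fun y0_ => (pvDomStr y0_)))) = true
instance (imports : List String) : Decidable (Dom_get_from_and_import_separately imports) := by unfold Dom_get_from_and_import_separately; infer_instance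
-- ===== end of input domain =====

-- B replaces A's two accumulator lists with one stable sort keyed on "first split token is 'from'" (idiomatic; same result).

-- ===== PORT A =====
-- A's loop condition: import_.split() and import_.split()[0] == 'from'
def pvIsFromA (s : String) : Bool :=
  match PySem.Str.split₀ s with
  | t :: _ => t == "from"
  | [] => false

def get_from_and_import_separately (imports : List String) : List String :=
  let p := imports.foldl
    (fun (acc : List String × List String) import_ =>
      if pvIsFromA import_ then (acc.1 ++ [import_], acc.2)
      else (acc.1, acc.2 ++ [import_]))
    ([], [])
  p.2 ++ p.1

-- ===== PORT B =====
def get_from_and_import_separately_alt (imports : List String) : List String :=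
  PySem.List.sorted imports
    (fun x => PySem.List.slice (PySem.Str.split₀ x) none (some 1) == ["from"]) false

-- ===== PRECONDITION & SPEC =====
def Spec_get_from_and_import_separately (imports : List String) (out : List String) : Prop := out = get_from_and_import_separately_alt imports
instance (imports : List String) (out : List String) : Decidable (Spec_get_from_and_import_separately imports out) := by unfold Spec_get_from_and_import_separately; infer_instance

-- ===== CLAIM (what is proved, stated in full; the proofs are below) =====
def Claim_equal_get_from_and_import_separately : Prop := ∀ (imports : List String), Dom_get_from_and_import_separately imports → Spec_get_from_and_import_separately imports (get_from_and_import_separately imports)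

-- ===== LEMMAS AND PROOFS =====

-- B's sort key coincides with A's loop condition.
lemma key_eq (s : String) :
    (PySem.List.slice (PySem.Str.split₀ s) none (some 1) == ["from"]) = pvIsFromA s := by
  have h : PySem.List.slice (PySem.Str.split₀ s) none (some 1) = (PySem.Str.split₀ s).take 1 := by
    simp [pysem]
  rw [h]
  unfold pvIsFromA
  cases PySem.Str.split₀ s with
  | nil => simp
  | cons t ts => simp [List.take, List.beq]

-- Inserting a false-key element lands exactly between the false block and the true block.
lemma insertBy_key_false {α : Type} (k : α → Bool) (x : α) (F T : List α)
    (hF : ∀ a ∈ F, k a = false) (hT : ∀ a ∈ T, k a = true) (hx : k x = false) :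
    PySem.List.insertBy (fun a b => decide (k a < k b)) x (F ++ T) = F ++ x :: T := by
  induction F with
  | nil =>
    cases T with
    | nil => simp [PySem.List.insertBy]
    | cons t ts =>
      have ht : k t = true := hT t (by simp)
      simp [PySem.List.insertBy, hx, ht]
  | cons f fs ih =>
    have hf : k f = false := hF f (by simp)
    simp [PySem.List.insertBy, hx, hf]
    exact ih (fun a ha => hF a (by simp [ha]))

-- Inserting a true-key element goes to the very end.
lemma insertBy_key_true {α : Type} (k : α → Bool) (x : α) (L : List α) (hx : k x = true) :
    PySem.List.insertBy (fun a b => decide (k a < k b)) x L = L ++ [x] := by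
  apply PySem.List.insertBy_of_forall_not_before
  intro y _
  cases k y <;> simp [hx]

-- The insertion-sort fold over a Bool key keeps a (false block ++ true block) invariant.
lemma foldl_insertBy_partition {α : Type} (k : α → Bool) (xs F T : List α)
    (hF : ∀ a ∈ F, k a = false) (hT : ∀ a ∈ T, k a = true) :
    xs.foldl (fun acc x => PySem.List.insertBy (fun a b => decide (k a < k b)) x acc) (F ++ T)
      = (F ++ xs.filter (fun x => !k x)) ++ (T ++ xs.filter k) := by
  induction xs generalizing F T with
  | nil => simp
  | cons x xs ih =>
    cases hx : k x with
    | false =>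
      have h1 := insertBy_key_false k x F T hF hT hx
      simp only [List.foldl_cons, h1]
      have h2 : F ++ x :: T = (F ++ [x]) ++ T := by simp
      rw [h2, ih (F ++ [x]) T (by intro a ha; rcases List.mem_append.mp ha with h | h
                                  · exact hF a h
                                  · simp at h; subst h; exact hx) hT]
      simp [List.filter, hx]
    | true =>
      have h1 := insertBy_key_true k x (F ++ T) hx
      simp only [List.foldl_cons, h1]
      rw [List.append_assoc, ih F (T ++ [x]) hF
            (by intro a ha; rcases List.mem_append.mp ha with h | h
                · exact hT a h
                · simp at h; subst h; exact hx)]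
      simp [List.filter, hx]

-- Stable sort by a Bool key is the stable partition: false-key elements first, then true-key.
lemma sorted_bool_key {α : Type} (xs : List α) (k : α → Bool) :
    PySem.List.sorted xs k false = xs.filter (fun x => !k x) ++ xs.filter k := by
  rw [PySem.List.sorted_eq_foldl_insertBy]
  have := foldl_insertBy_partition k xs [] [] (by simp) (by simp)
  simpa using this

-- A's two-accumulator loop computes the two filters.
lemma foldl_pair (xs : List String) (F I : List String) :
    xs.foldl
      (fun (acc : List String × List String) import_ =>
        if pvIsFromA import_ then (acc.1 ++ [import_], acc.2)
        else (acc.1, acc.2 ++ [import_])) (F, I)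
      = (F ++ xs.filter pvIsFromA, I ++ xs.filter (fun s => !pvIsFromA s)) := by
  induction xs generalizing F I with
  | nil => simp
  | cons x xs ih =>
    cases hx : pvIsFromA x <;>
      simp [List.filter, hx, ih, List.append_assoc]

-- ===== VERDICT (by name: the statement is the Claim_ definition above) =====
theorem get_from_and_import_separately_spec : Claim_equal_get_from_and_import_separately := by
  intro imports _
  unfold Spec_get_from_and_import_separately get_from_and_import_separately get_from_and_import_separately_alt
  have hk : (fun x => PySem.List.slice (PySem.Str.split₀ x) none (some 1) == ["from"]) = pvIsFromA := by
    funext s; exact key_eq s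
  rw [hk, sorted_bool_key imports pvIsFromA]
  simp [foldl_pair]
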